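-- pv_equiv track=rewrite | github.com/barteksmuga/subnet_calculator | cidrToBinary.py | cidr_to_binary
-- ===== SOURCE A (Python) =====
-- def cidr_to_binary(cidr):
--     k = []
--     st = ""
--     cidr = int(cidr)
--     for i in range(cidr):
--         k.append(1)
--     for i in range(cidr,32):
--         k.append(0)
--     j = 0
--     for i in k:
--         j += 1
--         if j > 8:
--             st = st + " "
--             j = 1
--         st = st + str(i)
--     return st
-- ===== SOURCE B (Python) =====
-- def cidr_to_binary(cidr):
--     cidr = int(cidr)
--     bits = '1' * cidr + '0' * (32 - cidr)
--     return ' '.join(bits[i:i + 8] for i in range(0, len(bits), 8))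
-- ===== Notes on version B (the rewrite author's own statement) =====
-- stated objective: simpler
-- what changed: Closed-form bit string ('1'*cidr + '0'*(32-cidr)) sliced into eight-character groups joined by spaces, replacing the intermediate list of ints and the per-character counter; string repetition and slicing also avoid A's per-character string concatenation.
import Mathlib
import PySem

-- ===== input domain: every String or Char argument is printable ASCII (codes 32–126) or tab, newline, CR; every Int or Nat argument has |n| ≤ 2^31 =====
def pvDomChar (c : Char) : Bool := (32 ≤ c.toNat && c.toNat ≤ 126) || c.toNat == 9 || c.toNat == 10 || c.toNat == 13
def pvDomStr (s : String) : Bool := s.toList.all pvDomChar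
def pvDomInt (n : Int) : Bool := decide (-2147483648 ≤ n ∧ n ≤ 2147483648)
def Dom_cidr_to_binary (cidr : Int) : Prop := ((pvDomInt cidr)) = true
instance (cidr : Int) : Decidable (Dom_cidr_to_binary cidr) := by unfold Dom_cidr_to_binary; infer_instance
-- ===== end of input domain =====

-- B builds the 32-bit mask in closed form ('1'*cidr + '0'*(32-cidr)) and groups it by slicing
-- into 8-char chunks joined with spaces, instead of A's list of ints and per-character counter (objective: simpler).


-- ===== PORT A =====
-- A-side helper: the body of A's output loop (j counter, st accumulator)
def pvStepA (p : Int × String) (i : Int) : Int × String :=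
  let j := p.1 + 1
  let q : Int × String := if j > 8 then (1, p.2 ++ " ") else (j, p.2)
  (q.1, q.2 ++ PySem.Int.toStr i)

def cidr_to_binary (cidr : Int) : String :=
  let k : List Int := []
  let st : String := ""
  let k := (PySem.List.pyRange 0 cidr 1).foldl (fun k _ => k ++ [(1 : Int)]) k
  let k := (PySem.List.pyRange cidr 32 1).foldl (fun k _ => k ++ [(0 : Int)]) k
  (k.foldl pvStepA (0, st)).2

-- ===== PORT B =====
def cidr_to_binary_alt (cidr : Int) : String :=
  -- '1' * cidr and '0' * (32 - cidr): Python repetition by a non-positive count is '', exactly Int.toNat's clamp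
  let bits : String := String.ofList (List.replicate cidr.toNat '1' ++ List.replicate (32 - cidr).toNat '0')
  PySem.Str.join " " ((PySem.List.pyRange 0 (PySem.Str.len bits) 8).map
    (fun i => PySem.Str.slice bits (some i) (some (i + 8))))

-- ===== PRECONDITION & SPEC =====
def Spec_cidr_to_binary (cidr : Int) (out : String) : Prop := out = cidr_to_binary_alt cidr
instance (cidr : Int) (out : String) : Decidable (Spec_cidr_to_binary cidr out) := by unfold Spec_cidr_to_binary; infer_instance

-- ===== CLAIM (what is proved, stated in full; the proofs are below) =====
def Claim_equal_cidr_to_binary : Prop := ∀ (cidr : Int), Dom_cidr_to_binary cidr → Spec_cidr_to_binary cidr (cidr_to_binary cidr)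

-- ===== LEMMAS AND PROOFS =====

-- char-level version of A's loop body (each appended str(i) is one char here)
def pvStepC (p : Int × String) (c : Char) : Int × String :=
  let j := p.1 + 1
  let q : Int × String := if j > 8 then (1, p.2 ++ " ") else (j, p.2)
  (q.1, q.2 ++ String.ofList [c])

def pvDig (i : Int) : Char := if i = 1 then '1' else '0'

-- the common mathematical form: chunks of 8 chars separated by spaces
def pvSpaced (cs : List Char) : List Char :=
  if h : cs = [] then [] else
    cs.take 8 ++ (if cs.drop 8 = [] then [] else ' ' :: pvSpaced (cs.drop 8))
termination_by cs.length
decreasing_by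
  have : cs.length ≠ 0 := fun hl => h (List.eq_nil_of_length_eq_zero hl)
  simp [List.length_drop]; omega

lemma pvStepA_eq_stepC (p : Int × String) (i : Int) (h : i = 0 ∨ i = 1) :
    pvStepA p i = pvStepC p (pvDig i) := by
  rcases h with h | h <;> subst h <;>
    simp [pvStepA, pvStepC, pvDig,
      (by decide : PySem.Int.toStr 0 = String.ofList ['0']),
      (by decide : PySem.Int.toStr 1 = String.ofList ['1'])]

lemma foldl_stepA_eq (s : List Int) (p : Int × String) (h : ∀ i ∈ s, i = 0 ∨ i = 1) :
    s.foldl pvStepA p = (s.map pvDig).foldl pvStepC p := by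
  induction s generalizing p with
  | nil => rfl
  | cons a t ih =>
      simp only [List.foldl_cons, List.map_cons]
      rw [pvStepA_eq_stepC p a (h a (by simp))]
      exact ih _ (fun i hi => h i (by simp [hi]))

lemma foldl_stepC_small (cs : List Char) : ∀ (j : Nat) (st : String), j + cs.length ≤ 8 →
    cs.foldl pvStepC ((j : Int), st) = (((j + cs.length : Nat) : Int), st ++ String.ofList cs) := by
  induction cs with
  | nil => intro j st _; simp
  | cons c t ih =>
      intro j st h
      simp only [List.length_cons] at h
      simp only [List.foldl_cons]
      have hnot : ¬ ((j : Int) + 1 > 8) := by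
        simp only [not_lt]; omega
      have hstep : pvStepC ((j : Int), st) c = (((j + 1 : Nat) : Int), st ++ String.ofList [c]) := by
        simp [pvStepC, hnot]
      rw [hstep, ih (j + 1) _ (by omega)]
      simp only [List.length_cons, Prod.mk.injEq]
      refine ⟨by push_cast; ring, ?_⟩
      rw [String.append_assoc]
      congr 1
      apply String.toList_inj.mp
      simp

lemma foldl_stepC_space (cs : List Char) (st : String) (h : cs ≠ []) :
    cs.foldl pvStepC (8, st) = cs.foldl pvStepC (0, st ++ " ") := by
  cases cs with
  | nil => exact absurd rfl h
  | cons c t =>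
      simp only [List.foldl_cons]
      congr 1

lemma pvSpaced_small {cs : List Char} (h : cs.length ≤ 8) : pvSpaced cs = cs := by
  by_cases hnil : cs = []
  · simp [hnil, pvSpaced]
  · rw [pvSpaced, dif_neg hnil, if_pos (List.drop_eq_nil_of_le h), List.take_of_length_le h]
    simp

lemma pvSpaced_big {cs : List Char} (h : 8 < cs.length) :
    pvSpaced cs = cs.take 8 ++ ' ' :: pvSpaced (cs.drop 8) := by
  have hnil : cs ≠ [] := by
    intro hc; subst hc; simp at h
  have hd : cs.drop 8 ≠ [] := by
    intro hc
    have := congrArg List.length hc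
    simp [List.length_drop] at this
    omega
  rw [pvSpaced]
  simp [hnil, hd]

lemma foldl_stepC_spaced (n : Nat) : ∀ (cs : List Char), cs.length ≤ n → ∀ (st : String),
    ((cs.foldl pvStepC (0, st)).2).toList = st.toList ++ pvSpaced cs := by
  induction n with
  | zero =>
      intro cs h st
      have : cs = [] := List.eq_nil_of_length_eq_zero (by omega)
      subst this
      simp [pvSpaced]
  | succ n ih =>
      intro cs h st
      by_cases h8 : cs.length ≤ 8
      · have := foldl_stepC_small cs 0 st (by omega)
        rw [(by norm_num : ((0 : Int), st) = (((0 : Nat) : Int), st)), this]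
        simp [pvSpaced_small h8]
      · rw [not_le] at h8
        have hsplit := List.take_append_drop 8 cs
        have hlen8 : (cs.take 8).length = 8 := by simp; omega
        have hd : cs.drop 8 ≠ [] := by
          intro hc
          have := congrArg List.length hc
          simp [List.length_drop] at this
          omega
        conv_lhs => rw [← hsplit]
        rw [List.foldl_append]
        have h0 := foldl_stepC_small (cs.take 8) 0 st (by omega)
        rw [(by norm_num : ((0 : Int), st) = (((0 : Nat) : Int), st)), h0]
        rw [hlen8]
        norm_num
        rw [foldl_stepC_space _ _ hd]
        rw [ih (cs.drop 8) (by simp [List.length_drop]; omega) _]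
        rw [pvSpaced_big h8]
        simp

lemma A_chars (cidr : Int) : (cidr_to_binary cidr).toList =
    pvSpaced (List.replicate cidr.toNat '1' ++ List.replicate (32 - cidr).toNat '0') := by
  have hk : cidr_to_binary cidr =
      ((List.replicate (cidr - 0).toNat (1 : Int) ++
        List.replicate (32 - cidr).toNat (0 : Int)).foldl pvStepA (0, "")).2 := by
    unfold cidr_to_binary
    simp only [PySem.List.foldl_append_singleton_eq_map, List.map_const',
      PySem.List.length_pyRange_one, List.nil_append]
  rw [hk]
  have hk : ∀ i ∈ List.replicate (cidr - 0).toNat (1 : Int) ++ List.replicate (32 - cidr).toNat (0 : Int),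
      i = 0 ∨ i = 1 := by
    intro i hi
    rcases List.mem_append.mp hi with hi | hi <;>
      simp [List.eq_of_mem_replicate hi]
  rw [foldl_stepA_eq _ _ hk]
  rw [foldl_stepC_spaced _ _ le_rfl]
  simp only [List.map_append, List.map_replicate]
  norm_num [pvDig]

lemma pyRange8_cons (a b : Int) (h : a < b) :
    PySem.List.pyRange a b 8 = a :: PySem.List.pyRange (a + 8) b 8 := by
  rw [PySem.List.pyRange_of_pos _ _ (by norm_num : (0 : Int) < 8),
      PySem.List.pyRange_of_pos _ _ (by norm_num : (0 : Int) < 8)]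
  rw [if_pos h]
  by_cases h2 : a + 8 < b
  · rw [if_pos h2]
    have hm : ((b - a + 8 - 1) / 8).toNat = ((b - (a + 8) + 8 - 1) / 8).toNat + 1 := by omega
    rw [hm, List.range_succ_eq_map]
    simp only [List.map_cons, List.map_map]
    congr 1
    · norm_num
    · apply List.map_congr_left
      intro k _
      simp [Nat.succ_eq_add_one]
      ring
  · rw [if_neg h2]
    have hm : ((b - a + 8 - 1) / 8).toNat = 1 := by omega
    rw [hm]
    simp

lemma pyRange8_shift (a b : Int) :
    PySem.List.pyRange (a + 8) b 8 = (PySem.List.pyRange a (b - 8) 8).map (· + 8) := by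
  rw [PySem.List.pyRange_of_pos _ _ (by norm_num : (0 : Int) < 8),
      PySem.List.pyRange_of_pos _ _ (by norm_num : (0 : Int) < 8)]
  by_cases h : a + 8 < b
  · rw [if_pos h, if_pos (by omega)]
    have : b - (a + 8) + 8 - 1 = b - 8 - a + 8 - 1 := by ring
    rw [this, List.map_map]
    apply List.map_congr_left
    intro k _
    simp
    ring
  · rw [if_neg h, if_neg (by omega)]
    simp

lemma B_chunks (n : Nat) : ∀ (cs : List Char), cs.length ≤ n →
    PySem.Chars.join [' '] ((PySem.List.pyRange 0 (cs.length : Int) 8).map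
      (fun i => PySem.List.slice cs (some i) (some (i + 8)))) = pvSpaced cs := by
  induction n with
  | zero =>
      intro cs h
      have : cs = [] := List.eq_nil_of_length_eq_zero (by omega)
      subst this
      simp [PySem.List.pyRange_of_pos 0 0 (by norm_num : (0 : Int) < 8),
        PySem.Chars.join_nil, pvSpaced]
  | succ n ih =>
      intro cs h
      by_cases hnil : cs = []
      · subst hnil
        simp [PySem.List.pyRange_of_pos 0 0 (by norm_num : (0 : Int) < 8),
          PySem.Chars.join_nil, pvSpaced]
      · have hpos : (0 : Int) < cs.length := by
          have := List.length_pos_of_ne_nil hnil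
          exact_mod_cast this
        rw [pyRange8_cons 0 _ hpos]
        have hhead : PySem.List.slice cs (some (0 : Int)) (some ((0 : Int) + 8)) = cs.take 8 := by
          rw [(by norm_num : (0 : Int) + 8 = 8),
            PySem.List.slice_toNat cs (by norm_num) (by norm_num)]
          simp
        by_cases h8 : cs.length ≤ 8
        · have htail : PySem.List.pyRange (0 + 8) (cs.length : Int) 8 = [] := by
            rw [PySem.List.pyRange_of_pos _ _ (by norm_num : (0 : Int) < 8)]
            rw [if_neg (by push_cast; omega)]
            simp
          rw [htail]
          simp only [List.map_cons, List.map_nil]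
          rw [PySem.Chars.join_singleton, hhead, List.take_of_length_le h8, pvSpaced_small h8]
        · rw [not_le] at h8
          rw [pyRange8_shift]
          simp only [List.map_cons, List.map_map]
          have hdl : ((cs.drop 8).length : Int) = (cs.length : Int) - 8 := by
            simp [List.length_drop]
            omega
          have hmap : (PySem.List.pyRange 0 ((cs.length : Int) - 8) 8).map
                ((fun i => PySem.List.slice cs (some i) (some (i + 8))) ∘ (· + 8))
              = (PySem.List.pyRange 0 ((cs.drop 8).length : Int) 8).map
                (fun i => PySem.List.slice (cs.drop 8) (some i) (some (i + 8))) := by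
            rw [hdl]
            apply List.map_congr_left
            intro i hi
            have h0i : 0 ≤ i := ((PySem.List.mem_pyRange_iff_of_pos (by norm_num) i).mp hi).1
            simp only [Function.comp]
            rw [PySem.List.slice_toNat cs (by omega) (by omega),
                PySem.List.slice_toNat (cs.drop 8) (by omega) (by omega),
                List.drop_drop]
            have e1 : (i + 8 + 8).toNat - (i + 8).toNat = 8 := by omega
            have e2 : (i + 8).toNat - i.toNat = 8 := by omega
            have e3 : (i + 8).toNat = i.toNat + 8 := by omega
            rw [e1, e2, e3, Nat.add_comm 8 i.toNat]
          rw [hmap]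
          have hdroplen : (cs.drop 8).length = cs.length - 8 := by simp
          have htail := ih (cs.drop 8) (by omega)
          have hne : (PySem.List.pyRange 0 ((cs.drop 8).length : Int) 8).map
              (fun i => PySem.List.slice (cs.drop 8) (some i) (some (i + 8))) ≠ [] := by
            simp only [ne_eq, List.map_eq_nil_iff]
            intro hc
            have : (0 : Int) ∈ PySem.List.pyRange 0 ((cs.drop 8).length : Int) 8 := by
              rw [(PySem.List.mem_pyRange_iff_of_pos (by norm_num) 0)]
              refine ⟨le_rfl, ?_, by simp⟩
              rw [hdl]; omega
            rw [hc] at this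
            simp at this
          obtain ⟨q, r, hqr⟩ := List.exists_cons_of_ne_nil hne
          rw [hqr, PySem.Chars.join_cons_cons, hhead, ← hqr, htail, pvSpaced_big h8]
          simp

lemma B_chars (cidr : Int) : (cidr_to_binary_alt cidr).toList =
    pvSpaced (List.replicate cidr.toNat '1' ++ List.replicate (32 - cidr).toNat '0') := by
  unfold cidr_to_binary_alt
  rw [PySem.Str.toList_join]
  simp only [List.map_map, Function.comp_def, PySem.Str.toList_slice,
    PySem.Chars.slice_eq_listSlice, PySem.Str.len_eq, String.toList_ofList]
  have hsep : (" " : String).toList = [' '] := by decide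
  rw [hsep]
  exact B_chunks _ _ le_rfl

-- ===== VERDICT (by name: the statement is the Claim_ definition above) =====
theorem cidr_to_binary_spec : Claim_equal_cidr_to_binary := by
  intro cidr _
  unfold Spec_cidr_to_binary
  exact String.toList_inj.mp ((A_chars cidr).trans (B_chars cidr).symm)
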